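-- pv_equiv track=rewrite | github.com/DhruvaBansal00/Deep-Learning-for-ASLR | Transformers/joeynmt/metrics.py | get_string_alignment
-- ===== SOURCE A (Python) =====
-- def get_string_alignment(sent_1, sent_2):
--     penalty_space = 1 ##insertion/deletion err weight
--     penalty_sub = 1 ##subsititution err weight
--
--     sentence_1_arr = sent_1.split(" ")
--     sentence_2_arr = sent_2.split(" ")
--
--     num_sent_1 = len(sentence_1_arr) + 1
--     num_sent_2 = len(sentence_2_arr) + 1
--
--     dp_matrix = [[0 for i in range(num_sent_2)] for j in range(num_sent_1)]
--
--     for row in range(0, num_sent_1):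
--         for col in range(0, num_sent_2):
--             if row == 0 or col == 0:
--                 dp_matrix[row][col] = (row + col) * penalty_space
--             else:
--                 if sentence_1_arr[row-1] ==  sentence_2_arr[col-1]:
--                     dp_matrix[row][col] = min(dp_matrix[row-1][col-1], penalty_space + min(dp_matrix[row-1][col], dp_matrix[row][col-1]))
--                 else:
--                     dp_matrix[row][col] = min(penalty_sub + dp_matrix[row-1][col-1], penalty_space + min(dp_matrix[row-1][col], dp_matrix[row][col-1]))
--
--     # display_dp(dp_matrix)
--
--     aligned_sent_1 = []
--     aligned_sent_2 = []
--     row = num_sent_1 - 1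
--     col = num_sent_2 - 1
--
--     while row != 0 and col != 0:
--         if sentence_1_arr[row - 1] == sentence_2_arr[col - 1] and dp_matrix[row][col] == dp_matrix[row - 1][col - 1]:
--             aligned_sent_1.insert(0, sentence_1_arr[row -1])
--             aligned_sent_2.insert(0, sentence_2_arr[col - 1])
--             row -= 1
--             col -= 1
--         elif sentence_1_arr[row - 1] != sentence_2_arr[col - 1] and  dp_matrix[row][col] == (dp_matrix[row - 1][col - 1] + penalty_sub):
--             aligned_sent_1.insert(0, sentence_1_arr[row - 1])
--             aligned_sent_2.insert(0, sentence_2_arr[col - 1])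
--             row -= 1
--             col -= 1
--         elif dp_matrix[row][col] == (dp_matrix[row][col - 1] + penalty_space):
--             aligned_sent_1.insert(0, "_")
--             aligned_sent_2.insert(0, sentence_2_arr[col - 1])
--             col -= 1
--         elif dp_matrix[row][col] == (dp_matrix[row - 1][col] + penalty_space):
--             aligned_sent_1.insert(0, sentence_1_arr[row - 1])
--             aligned_sent_2.insert(0, "_")
--             row -= 1
--
--     while row > 0 or col > 0:
--         if row > 0:
--             aligned_sent_1.insert(0, sentence_1_arr[row - 1])
--             aligned_sent_2.insert(0, "_")
--             row -= 1
--         else: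
--             aligned_sent_1.insert(0, "_")
--             aligned_sent_2.insert(0, sentence_2_arr[col - 1])
--             col -= 1
--
--     return aligned_sent_1, aligned_sent_2
-- ===== SOURCE B (Python) =====
-- def get_string_alignment(sent_1, sent_2):
--     a = sent_1.split(" ")
--     b = sent_2.split(" ")
--     # Each cell is (cost, chain1, chain2): the optimal alignment itself, held as
--     # shared persistent cons-chains (word, rest) built front-to-back, so the
--     # answer is read off the last cell and no traceback pass exists.
--     prev = [(0, None, None)]
--     for j in range(1, len(b) + 1):
--         c, x, y = prev[j - 1]
--         prev.append((c + 1, ("_", x), (b[j - 1], y)))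
--     for i in range(1, len(a) + 1):
--         c, x, y = prev[0]
--         cur = [(c + 1, (a[i - 1], x), ("_", y))]
--         for j in range(1, len(b) + 1):
--             dc, dx, dy = prev[j - 1]
--             lc, lx, ly = cur[j - 1]
--             uc, ux, uy = prev[j]
--             sub = 0 if a[i - 1] == b[j - 1] else 1
--             best = min(dc + sub, lc + 1, uc + 1)
--             if best == dc + sub:
--                 cur.append((best, (a[i - 1], dx), (b[j - 1], dy)))
--             elif best == lc + 1:
--                 cur.append((best, ("_", lx), (b[j - 1], ly)))
--             else:
--                 cur.append((best, (a[i - 1], ux), ("_", uy)))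
--         prev = cur
--     _, x, y = prev[len(b)]
--     out1, out2 = [], []
--     while x is not None:
--         out1.append(x[0])
--         x = x[1]
--     while y is not None:
--         out2.append(y[0])
--         y = y[1]
--     out1.reverse()
--     out2.reverse()
--     return out1, out2
-- ===== Notes on version B (the rewrite author's own statement) =====
-- stated objective: alternative
-- what changed: B eliminates the traceback phase entirely: instead of filling a cost matrix and then walking it backwards, each DP cell carries its own optimal alignment as shared persistent cons-chains (cost, chain1, chain2) built during one forward pass over rolling rows, and the answer is read straight off the last cell and unwound.
import Mathlib
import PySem

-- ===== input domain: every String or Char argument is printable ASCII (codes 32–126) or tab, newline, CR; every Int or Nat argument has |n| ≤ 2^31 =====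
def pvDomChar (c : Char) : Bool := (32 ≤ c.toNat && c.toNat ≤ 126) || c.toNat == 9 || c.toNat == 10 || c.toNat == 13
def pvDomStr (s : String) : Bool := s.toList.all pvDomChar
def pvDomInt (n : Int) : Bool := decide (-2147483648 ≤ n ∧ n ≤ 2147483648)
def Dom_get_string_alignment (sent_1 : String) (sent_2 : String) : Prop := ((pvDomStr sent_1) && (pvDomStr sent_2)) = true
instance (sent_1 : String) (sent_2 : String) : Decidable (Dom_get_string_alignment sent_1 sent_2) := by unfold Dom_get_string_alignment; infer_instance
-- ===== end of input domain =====

-- B removes A's traceback phase: every DP cell carries its own optimal alignment as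
-- shared persistent cons-chains built in one forward pass over rolling rows, and the
-- result is read off the last cell; same O(n·m) cost, a different decomposition.

-- ===== PORT A =====
-- dp_matrix[i][j] read/write (all of A's accesses are in range)
def pvMget (M : List (List Int)) (i j : Nat) : Int := (M.getD i []).getD j 0
def pvMset (M : List (List Int)) (i j : Nat) (v : Int) : List (List Int) :=
  M.set i ((M.getD i []).set j v)

-- the body of A's double fill loop, verbatim
def pvStepA (s1 s2 : List String) (row : Nat) (M : List (List Int)) (col : Nat) : List (List Int) :=
  if row = 0 ∨ col = 0 then pvMset M row col ((row : Int) + (col : Int))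
  else if s1.getD (row - 1) "" = s2.getD (col - 1) "" then
    pvMset M row col (min (pvMget M (row - 1) (col - 1))
      (1 + min (pvMget M (row - 1) col) (pvMget M row (col - 1))))
  else
    pvMset M row col (min (1 + pvMget M (row - 1) (col - 1))
      (1 + min (pvMget M (row - 1) col) (pvMget M row (col - 1))))

-- A's dp_matrix: zeros, then the double loop
def pvFillA (s1 s2 : List String) : List (List Int) :=
  (List.range (s1.length + 1)).foldl
    (fun M row => (List.range (s2.length + 1)).foldl (pvStepA s1 s2 row) M)
    (List.replicate (s1.length + 1) (List.replicate (s2.length + 1) (0 : Int)))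

-- A's second while loop (drain; row/col stay ≥ 0 in Python, so they are Nat here)
def pvLoop2 (s1 s2 : List String) : Nat → Nat → List String → List String → List String × List String
  | r+1, c, a1, a2 => pvLoop2 s1 s2 r c (s1.getD r "" :: a1) ("_" :: a2)
  | 0, c+1, a1, a2 => pvLoop2 s1 s2 0 c ("_" :: a1) (s2.getD c "" :: a2)
  | 0, 0, a1, a2 => (a1, a2)

-- A's first while loop; the final fallthrough is unreachable for the dp matrix A builds
-- (on it Python's loop body would change nothing and never terminate)
def pvLoop1 (s1 s2 : List String) (M : List (List Int)) : Nat → Nat → List String → List String → List String × List String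
  | r+1, c+1, a1, a2 =>
    if s1.getD r "" = s2.getD c "" ∧ pvMget M (r+1) (c+1) = pvMget M r c then
      pvLoop1 s1 s2 M r c (s1.getD r "" :: a1) (s2.getD c "" :: a2)
    else if s1.getD r "" ≠ s2.getD c "" ∧ pvMget M (r+1) (c+1) = pvMget M r c + 1 then
      pvLoop1 s1 s2 M r c (s1.getD r "" :: a1) (s2.getD c "" :: a2)
    else if pvMget M (r+1) (c+1) = pvMget M (r+1) c + 1 then
      pvLoop1 s1 s2 M (r+1) c ("_" :: a1) (s2.getD c "" :: a2)
    else if pvMget M (r+1) (c+1) = pvMget M r (c+1) + 1 then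
      pvLoop1 s1 s2 M r (c+1) (s1.getD r "" :: a1) ("_" :: a2)
    else (a1, a2)
  | 0, c, a1, a2 => pvLoop2 s1 s2 0 c a1 a2
  | r+1, 0, a1, a2 => pvLoop2 s1 s2 (r+1) 0 a1 a2
  termination_by r c _ _ => (r, c)

def get_string_alignment (sent_1 : String) (sent_2 : String) : List String × List String :=
  let s1 := (PySem.Str.split? sent_1 " ").getD []  -- sep " " ≠ "", so split? is always some
  let s2 := (PySem.Str.split? sent_2 " ").getD []
  let n1 := s1.length + 1
  let n2 := s2.length + 1
  pvLoop1 s1 s2 (pvFillA s1 s2) (n1 - 1) (n2 - 1) [] []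

-- ===== PORT B =====
-- a cell: (cost, chain1, chain2); a Python cons-chain (w, rest)/None is w :: rest / []
-- B's first loop: boundary row 0
def pvRow0B (s2 : List String) : List (Int × List String × List String) :=
  (List.range s2.length).foldl
    (fun prev j0 =>
      let j := j0 + 1
      let p := prev.getD (j - 1) ((0 : Int), [], [])
      prev ++ [(p.1 + 1, "_" :: p.2.1, s2.getD (j - 1) "" :: p.2.2)])
    [((0 : Int), [], [])]

-- body of B's inner loop: extend the current row by one cell
def pvCellB (s1 s2 : List String) (i : Nat)
    (prev : List (Int × List String × List String))
    (cur : List (Int × List String × List String)) (j0 : Nat) :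
    List (Int × List String × List String) :=
  let j := j0 + 1
  let d := prev.getD (j - 1) ((0 : Int), [], [])
  let l := cur.getD (j - 1) ((0 : Int), [], [])
  let u := prev.getD j ((0 : Int), [], [])
  let sub : Int := if s1.getD (i - 1) "" = s2.getD (j - 1) "" then 0 else 1
  let best := min (d.1 + sub) (min (l.1 + 1) (u.1 + 1))
  if best = d.1 + sub then
    cur ++ [(best, s1.getD (i - 1) "" :: d.2.1, s2.getD (j - 1) "" :: d.2.2)]
  else if best = l.1 + 1 then
    cur ++ [(best, "_" :: l.2.1, s2.getD (j - 1) "" :: l.2.2)]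
  else
    cur ++ [(best, s1.getD (i - 1) "" :: u.2.1, "_" :: u.2.2)]

-- body of B's outer loop: build row i from the previous row
def pvRowStepB (s1 s2 : List String)
    (prev : List (Int × List String × List String)) (i0 : Nat) :
    List (Int × List String × List String) :=
  let i := i0 + 1
  let p := prev.getD 0 ((0 : Int), [], [])
  (List.range s2.length).foldl (pvCellB s1 s2 i prev)
    [(p.1 + 1, s1.getD (i - 1) "" :: p.2.1, "_" :: p.2.2)]

-- B's final while loops: unwind a chain into a list (append, then reverse outside)
def pvUnwindB : List String → List String → List String
  | acc, [] => acc
  | acc, w :: x => pvUnwindB (acc ++ [w]) x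

def get_string_alignment_alt (sent_1 : String) (sent_2 : String) : List String × List String :=
  let s1 := (PySem.Str.split? sent_1 " ").getD []  -- sep " " ≠ "", so split? is always some
  let s2 := (PySem.Str.split? sent_2 " ").getD []
  let last := (List.range s1.length).foldl (pvRowStepB s1 s2) (pvRow0B s2)
  let f := last.getD s2.length ((0 : Int), [], [])
  ((pvUnwindB [] f.2.1).reverse, (pvUnwindB [] f.2.2).reverse)

-- ===== PRECONDITION & SPEC =====
def Spec_get_string_alignment (sent_1 : String) (sent_2 : String) (out : List String × List String) : Prop := out = get_string_alignment_alt sent_1 sent_2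
instance (sent_1 : String) (sent_2 : String) (out : List String × List String) : Decidable (Spec_get_string_alignment sent_1 sent_2 out) := by unfold Spec_get_string_alignment; infer_instance

-- ===== CLAIM (what is proved, stated in full; the proofs are below) =====
def Claim_equal_get_string_alignment : Prop := ∀ (sent_1 : String) (sent_2 : String), Dom_get_string_alignment sent_1 sent_2 → Spec_get_string_alignment sent_1 sent_2 (get_string_alignment sent_1 sent_2)

-- ===== LEMMAS AND PROOFS =====

-- the mathematical dp value (A's recurrence, verbatim)
def pvD (s1 s2 : List String) : Nat → Nat → Int
  | 0, j => (j : Int)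
  | i+1, 0 => (i : Int) + 1
  | i+1, j+1 =>
    if s1.getD i "" = s2.getD j "" then
      min (pvD s1 s2 i j) (1 + min (pvD s1 s2 i (j+1)) (pvD s1 s2 (i+1) j))
    else
      min (1 + pvD s1 s2 i j) (1 + min (pvD s1 s2 i (j+1)) (pvD s1 s2 (i+1) j))
  termination_by i j => (i, j)

-- the cell B computes at (i, j): cost and the reversed alignment as chains
def pvPure (s1 s2 : List String) : Nat → Nat → Int × List String × List String
  | 0, 0 => (0, [], [])
  | 0, j+1 =>
    let p := pvPure s1 s2 0 j
    (p.1 + 1, "_" :: p.2.1, s2.getD j "" :: p.2.2)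
  | i+1, 0 =>
    let p := pvPure s1 s2 i 0
    (p.1 + 1, s1.getD i "" :: p.2.1, "_" :: p.2.2)
  | i+1, j+1 =>
    let d := pvPure s1 s2 i j
    let l := pvPure s1 s2 (i+1) j
    let u := pvPure s1 s2 i (j+1)
    let sub : Int := if s1.getD i "" = s2.getD j "" then 0 else 1
    let best := min (d.1 + sub) (min (l.1 + 1) (u.1 + 1))
    if best = d.1 + sub then (best, s1.getD i "" :: d.2.1, s2.getD j "" :: d.2.2)
    else if best = l.1 + 1 then (best, "_" :: l.2.1, s2.getD j "" :: l.2.2)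
    else (best, s1.getD i "" :: u.2.1, "_" :: u.2.2)
  termination_by i j => (i, j)

theorem pvD_zero_right (s1 s2 : List String) (i : Nat) : pvD s1 s2 i 0 = (i : Int) := by
  cases i <;> simp [pvD]

theorem pvD_interior (s1 s2 : List String) (i j : Nat) :
    pvD s1 s2 (i+1) (j+1) =
      min (pvD s1 s2 i j + (if s1.getD i "" = s2.getD j "" then 0 else 1))
        (min (pvD s1 s2 (i+1) j + 1) (pvD s1 s2 i (j+1) + 1)) := by
  simp only [pvD]
  split_ifs with h <;> omega

theorem pvPure_cost (s1 s2 : List String) :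
    ∀ n i j, i + j ≤ n → (pvPure s1 s2 i j).1 = pvD s1 s2 i j := by
  intro n
  induction n with
  | zero =>
    intro i j h
    have hi : i = 0 := by omega
    have hj : j = 0 := by omega
    subst hi; subst hj
    simp [pvPure, pvD]
  | succ n ih =>
    intro i j h
    cases i with
    | zero =>
      cases j with
      | zero => simp [pvPure, pvD]
      | succ j' =>
        show (pvPure s1 s2 0 (j'+1)).1 = _
        rw [pvPure]
        dsimp only
        rw [ih 0 j' (by omega)]
        simp [pvD]
    | succ i' =>
      cases j with
      | zero =>
        show (pvPure s1 s2 (i'+1) 0).1 = _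
        rw [pvPure]
        dsimp only
        rw [ih i' 0 (by omega), pvD_zero_right, pvD_zero_right]
        push_cast
        ring
      | succ j' =>
        show (pvPure s1 s2 (i'+1) (j'+1)).1 = _
        rw [pvPure, pvD_interior]
        rw [ih i' j' (by omega), ih (i'+1) j' (by omega), ih i' (j'+1) (by omega)]
        split_ifs <;> rfl

-- pvPure at an interior cell, with the costs written via pvD
theorem pvPure_interior (s1 s2 : List String) (i j : Nat) :
    pvPure s1 s2 (i+1) (j+1) =
      (let sub : Int := if s1.getD i "" = s2.getD j "" then 0 else 1
       let best := min (pvD s1 s2 i j + sub)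
         (min (pvD s1 s2 (i+1) j + 1) (pvD s1 s2 i (j+1) + 1))
       if best = pvD s1 s2 i j + sub then
         (best, s1.getD i "" :: (pvPure s1 s2 i j).2.1, s2.getD j "" :: (pvPure s1 s2 i j).2.2)
       else if best = pvD s1 s2 (i+1) j + 1 then
         (best, "_" :: (pvPure s1 s2 (i+1) j).2.1, s2.getD j "" :: (pvPure s1 s2 (i+1) j).2.2)
       else
         (best, s1.getD i "" :: (pvPure s1 s2 i (j+1)).2.1, "_" :: (pvPure s1 s2 i (j+1)).2.2)) := by
  rw [pvPure]
  rw [pvPure_cost s1 s2 (i+j) i j le_rfl,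
    pvPure_cost s1 s2 (i+1+j) (i+1) j le_rfl,
    pvPure_cost s1 s2 (i+(j+1)) i (j+1) le_rfl]

-- best at an interior cell IS the dp value there
theorem pvBest_eq (s1 s2 : List String) (i j : Nat) :
    min (pvD s1 s2 i j + (if s1.getD i "" = s2.getD j "" then 0 else 1))
      (min (pvD s1 s2 (i+1) j + 1) (pvD s1 s2 i (j+1) + 1)) = pvD s1 s2 (i+1) (j+1) :=
  (pvD_interior s1 s2 i j).symm

theorem pvMget_pvMset (M : List (List Int)) (i j : Nat) (v : Int) (i' j' : Nat)
    (hi : i < M.length) (hj : j < (M.getD i []).length) :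
    pvMget (pvMset M i j v) i' j' = if i' = i ∧ j' = j then v else pvMget M i' j' := by
  unfold pvMget pvMset
  rw [List.getD_eq_getElem?_getD] at hj
  simp only [List.getD_eq_getElem?_getD, List.getElem?_set]
  by_cases h1 : i = i'
  · subst h1
    simp only [if_pos hi]
    by_cases h2 : j = j'
    · subst h2
      simp [hj]
    · have h2' : ¬ j' = j := fun hh => h2 hh.symm
      simp [h2, h2']
  · have h1' : ¬ i' = i := fun hh => h1 hh.symm
    simp [h1, h1']

theorem length_pvMset (M : List (List Int)) (i j : Nat) (v : Int) :
    (pvMset M i j v).length = M.length := by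
  simp [pvMset]

theorem rowlen_pvMset (M : List (List Int)) (i j : Nat) (v : Int) (i' : Nat) :
    ((pvMset M i j v).getD i' []).length = (M.getD i' []).length := by
  unfold pvMset
  simp only [List.getD_eq_getElem?_getD, List.getElem?_set]
  by_cases h1 : i = i'
  · subst h1
    by_cases hi : i < M.length
    · simp [hi]
    · have : M[i]? = none := List.getElem?_eq_none (by omega)
      simp [hi]
  · simp [h1]

-- invariant for A's fill: rows < R and, on row R, cols < C are final; the rest still 0
def pvInv (s1 s2 : List String) (R C : Nat) (M : List (List Int)) : Prop :=
  M.length = s1.length + 1 ∧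
  (∀ i, (M.getD i []).length = if i < s1.length + 1 then s2.length + 1 else 0) ∧
  (∀ i j, i < s1.length + 1 → j < s2.length + 1 →
    pvMget M i j = if i < R ∨ (i = R ∧ j < C) then pvD s1 s2 i j else 0)

theorem pvInv_step (s1 s2 : List String) (R C : Nat) (M : List (List Int))
    (hR : R < s1.length + 1) (hC : C < s2.length + 1) (h : pvInv s1 s2 R C M) :
    pvInv s1 s2 R (C+1) (pvStepA s1 s2 R M C) := by
  obtain ⟨hlen, hrow, hval⟩ := h
  have hiM : R < M.length := by omega
  have hjM : C < (M.getD R []).length := by rw [hrow R, if_pos hR]; exact hC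
  have key : ∀ val, val = pvD s1 s2 R C → pvInv s1 s2 R (C+1) (pvMset M R C val) := by
    intro val hvalEq
    refine ⟨by rw [length_pvMset]; exact hlen, ?_, ?_⟩
    · intro i; rw [rowlen_pvMset]; exact hrow i
    · intro i j hi hj
      rw [pvMget_pvMset M R C val i j hiM hjM]
      by_cases hc : i = R ∧ j = C
      · obtain ⟨h1, h2⟩ := hc; subst h1; subst h2
        rw [if_pos ⟨rfl, rfl⟩, if_pos (by omega)]
        exact hvalEq
      · rw [if_neg hc, hval i j hi hj]
        split_ifs <;> first | rfl | (exfalso; omega)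
  unfold pvStepA
  by_cases h0 : R = 0 ∨ C = 0
  · rw [if_pos h0]
    apply key
    rcases h0 with h0 | h0
    · subst h0; simp [pvD]
    · subst h0; rw [pvD_zero_right]; simp
  · rw [if_neg h0]
    obtain ⟨r, rfl⟩ : ∃ r, R = r + 1 := ⟨R - 1, by omega⟩
    obtain ⟨c, rfl⟩ : ∃ c, C = c + 1 := ⟨C - 1, by omega⟩
    simp only [Nat.add_sub_cancel]
    have e1 : pvMget M r c = pvD s1 s2 r c := by
      rw [hval r c (by omega) (by omega), if_pos (by omega)]
    have e2 : pvMget M r (c+1) = pvD s1 s2 r (c+1) := by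
      rw [hval r (c+1) (by omega) (by omega), if_pos (by omega)]
    have e3 : pvMget M (r+1) c = pvD s1 s2 (r+1) c := by
      rw [hval (r+1) c (by omega) (by omega), if_pos (by omega)]
    by_cases hm : s1.getD r "" = s2.getD c ""
    · rw [if_pos hm]
      apply key
      rw [e1, e2, e3]
      conv_rhs => rw [pvD]
      rw [if_pos hm]
    · rw [if_neg hm]
      apply key
      rw [e1, e2, e3]
      conv_rhs => rw [pvD]
      rw [if_neg hm]

theorem pvInv_inner (s1 s2 : List String) (R : Nat) (M : List (List Int))
    (hR : R < s1.length + 1) (h : pvInv s1 s2 R 0 M) :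
    ∀ C, C ≤ s2.length + 1 → pvInv s1 s2 R C ((List.range C).foldl (pvStepA s1 s2 R) M) := by
  intro C
  induction C with
  | zero => intro _; simpa using h
  | succ C ih =>
    intro hC
    rw [List.range_succ, List.foldl_append, List.foldl_cons, List.foldl_nil]
    exact pvInv_step s1 s2 R C _ hR (by omega) (ih (by omega))

theorem pvInv_init (s1 s2 : List String) :
    pvInv s1 s2 0 0 (List.replicate (s1.length + 1) (List.replicate (s2.length + 1) (0 : Int))) := by
  refine ⟨by simp, ?_, ?_⟩
  · intro i
    simp only [List.getD_eq_getElem?_getD, List.getElem?_replicate]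
    split_ifs <;> simp
  · intro i j hi hj
    simp [pvMget, List.getD_eq_getElem?_getD, hi, hj]

theorem pvInv_outer (s1 s2 : List String) :
    ∀ R, R ≤ s1.length + 1 → pvInv s1 s2 R 0
      ((List.range R).foldl (fun M row => (List.range (s2.length + 1)).foldl (pvStepA s1 s2 row) M)
        (List.replicate (s1.length + 1) (List.replicate (s2.length + 1) (0 : Int)))) := by
  intro R
  induction R with
  | zero => intro _; simpa using pvInv_init s1 s2
  | succ R ih =>
    intro hR
    rw [show List.range (R+1) = List.range R ++ [R] from List.range_succ,
      List.foldl_append, List.foldl_cons, List.foldl_nil]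
    obtain ⟨ha, hb, hc⟩ :=
      pvInv_inner s1 s2 R _ (by omega) (ih (by omega)) (s2.length + 1) le_rfl
    refine ⟨ha, hb, ?_⟩
    intro i j hi hj
    rw [hc i j hi hj]
    split_ifs <;> first | rfl | (exfalso; omega)

theorem fillA_correct (s1 s2 : List String) (i j : Nat)
    (hi : i ≤ s1.length) (hj : j ≤ s2.length) :
    pvMget (pvFillA s1 s2) i j = pvD s1 s2 i j := by
  have h := (pvInv_outer s1 s2 (s1.length + 1) le_rfl).2.2 i j (by omega) (by omega)
  unfold pvFillA
  rw [h, if_pos (by omega)]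

-- B's rolling rows equal the pvPure table
theorem getD_map_range {α : Type} (k : Nat) (f : Nat → α) (j : Nat) (hj : j < k) (d : α) :
    ((List.range k).map f).getD j d = f j := by
  simp [List.getD_eq_getElem?_getD, List.getElem?_map, List.getElem?_range hj]

theorem pvRow0B_eq (s1 s2 : List String) :
    pvRow0B s2 = (List.range (s2.length + 1)).map (pvPure s1 s2 0) := by
  unfold pvRow0B
  suffices h : ∀ k, k ≤ s2.length →
      (List.range k).foldl
        (fun prev j0 =>
          let j := j0 + 1
          let p := prev.getD (j - 1) ((0 : Int), [], [])
          prev ++ [(p.1 + 1, "_" :: p.2.1, s2.getD (j - 1) "" :: p.2.2)])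
        [((0 : Int), [], [])] = (List.range (k + 1)).map (pvPure s1 s2 0) by
    exact h s2.length le_rfl
  intro k
  induction k with
  | zero => intro _; simp [pvPure]
  | succ k ih =>
    intro hk
    rw [List.range_succ, List.foldl_append, List.foldl_cons, List.foldl_nil, ih (by omega)]
    dsimp only
    rw [Nat.add_sub_cancel, getD_map_range _ _ k (by omega)]
    conv_rhs => rw [List.range_succ]
    rw [List.map_append]
    simp only [List.map_cons, List.map_nil]
    congr 1
    rw [pvPure]

theorem pvCellB_fold (s1 s2 : List String) (i0 : Nat) :
    ∀ jj, jj ≤ s2.length →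
      (List.range jj).foldl
        (pvCellB s1 s2 (i0+1) ((List.range (s2.length + 1)).map (pvPure s1 s2 i0)))
        [((pvPure s1 s2 i0 0).1 + 1, s1.getD i0 "" :: (pvPure s1 s2 i0 0).2.1,
          "_" :: (pvPure s1 s2 i0 0).2.2)]
        = (List.range (jj+1)).map (pvPure s1 s2 (i0+1)) := by
  intro jj
  induction jj with
  | zero =>
    intro _
    simp only [List.range_zero, List.foldl_nil]
    congr 1
    rw [show pvPure s1 s2 (i0+1) 0 =
      ((pvPure s1 s2 i0 0).1 + 1, s1.getD i0 "" :: (pvPure s1 s2 i0 0).2.1,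
        "_" :: (pvPure s1 s2 i0 0).2.2) from by rw [pvPure]]
  | succ jj ih =>
    intro hjj
    rw [show List.range (jj+1) = List.range jj ++ [jj] from List.range_succ,
      List.foldl_append, List.foldl_cons, List.foldl_nil, ih (by omega)]
    unfold pvCellB
    dsimp only
    simp only [Nat.add_sub_cancel]
    rw [getD_map_range _ _ jj (by omega), getD_map_range _ _ (jj+1) (by omega),
      getD_map_range _ _ jj (by omega)]
    rw [pvPure_cost s1 s2 (i0+jj) i0 jj le_rfl,
      pvPure_cost s1 s2 (i0+1+jj) (i0+1) jj le_rfl,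
      pvPure_cost s1 s2 (i0+(jj+1)) i0 (jj+1) le_rfl]
    conv_rhs => rw [List.range_succ]
    rw [List.map_append]
    simp only [List.map_cons, List.map_nil]
    rw [pvPure_interior s1 s2 i0 jj]
    dsimp only
    split_ifs <;> rfl

theorem pvRowsB_last (s1 s2 : List String) :
    (List.range s1.length).foldl (pvRowStepB s1 s2) (pvRow0B s2)
      = (List.range (s2.length + 1)).map (pvPure s1 s2 s1.length) := by
  suffices h : ∀ k, k ≤ s1.length →
      (List.range k).foldl (pvRowStepB s1 s2) (pvRow0B s2)
        = (List.range (s2.length + 1)).map (pvPure s1 s2 k) by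
    exact h s1.length le_rfl
  intro k
  induction k with
  | zero => intro _; simpa using pvRow0B_eq s1 s2
  | succ k ih =>
    intro hk
    rw [List.range_succ, List.foldl_append, List.foldl_cons, List.foldl_nil, ih (by omega)]
    unfold pvRowStepB
    dsimp only
    rw [Nat.add_sub_cancel, getD_map_range _ _ 0 (by omega)]
    exact pvCellB_fold s1 s2 k s2.length le_rfl

theorem pvUnwindB_eq (l : List String) : ∀ acc, pvUnwindB acc l = acc ++ l := by
  induction l with
  | nil => intro acc; simp [pvUnwindB]
  | cons w x ih => intro acc; rw [pvUnwindB, ih]; simp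

-- traceback equivalence: A's while loops produce pvPure's (reversed) chains
theorem trace_loop2 (s1 s2 : List String) :
    ∀ i j, (i = 0 ∨ j = 0) → ∀ a1 a2,
      pvLoop2 s1 s2 i j a1 a2 =
        ((pvPure s1 s2 i j).2.1.reverse ++ a1, (pvPure s1 s2 i j).2.2.reverse ++ a2) := by
  have hrow : ∀ j a1 a2, pvLoop2 s1 s2 0 j a1 a2 =
      ((pvPure s1 s2 0 j).2.1.reverse ++ a1, (pvPure s1 s2 0 j).2.2.reverse ++ a2) := by
    intro j
    induction j with
    | zero => intro a1 a2; simp [pvLoop2, pvPure]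
    | succ j ih =>
      intro a1 a2
      rw [show pvLoop2 s1 s2 0 (j+1) a1 a2
          = pvLoop2 s1 s2 0 j ("_" :: a1) (s2.getD j "" :: a2) from by rw [pvLoop2]]
      rw [ih]
      rw [show pvPure s1 s2 0 (j+1) =
        ((pvPure s1 s2 0 j).1 + 1, "_" :: (pvPure s1 s2 0 j).2.1,
          s2.getD j "" :: (pvPure s1 s2 0 j).2.2) from by rw [pvPure]]
      simp
  intro i j h
  rcases h with h | h
  · subst h; exact hrow j
  · subst h
    induction i with
    | zero => exact hrow 0
    | succ i ih =>
      intro a1 a2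
      rw [show pvLoop2 s1 s2 (i+1) 0 a1 a2
          = pvLoop2 s1 s2 i 0 (s1.getD i "" :: a1) ("_" :: a2) from by rw [pvLoop2]]
      rw [ih]
      rw [show pvPure s1 s2 (i+1) 0 =
        ((pvPure s1 s2 i 0).1 + 1, s1.getD i "" :: (pvPure s1 s2 i 0).2.1,
          "_" :: (pvPure s1 s2 i 0).2.2) from by rw [pvPure]]
      simp

theorem trace_loop1 (s1 s2 : List String) (M : List (List Int))
    (hM : ∀ i j, i ≤ s1.length → j ≤ s2.length → pvMget M i j = pvD s1 s2 i j) :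
    ∀ f i j, i + j ≤ f → i ≤ s1.length → j ≤ s2.length → ∀ a1 a2,
      pvLoop1 s1 s2 M i j a1 a2 =
        ((pvPure s1 s2 i j).2.1.reverse ++ a1, (pvPure s1 s2 i j).2.2.reverse ++ a2) := by
  intro f
  induction f with
  | zero =>
    intro i j hf _ _ a1 a2
    have hi0 : i = 0 := by omega
    have hj0 : j = 0 := by omega
    subst hi0; subst hj0
    simp [pvLoop1, pvLoop2, pvPure]
  | succ f ih =>
    intro i j hf hi hj a1 a2
    cases i with
    | zero =>
      rw [show pvLoop1 s1 s2 M 0 j a1 a2 = pvLoop2 s1 s2 0 j a1 a2 from by rw [pvLoop1]]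
      exact trace_loop2 s1 s2 0 j (Or.inl rfl) a1 a2
    | succ i' =>
      cases j with
      | zero =>
        rw [show pvLoop1 s1 s2 M (i'+1) 0 a1 a2 = pvLoop2 s1 s2 (i'+1) 0 a1 a2 from by rw [pvLoop1]]
        exact trace_loop2 s1 s2 (i'+1) 0 (Or.inr rfl) a1 a2
      | succ j' =>
        have e11 : pvMget M (i'+1) (j'+1) = pvD s1 s2 (i'+1) (j'+1) := hM _ _ (by omega) (by omega)
        have e00 : pvMget M i' j' = pvD s1 s2 i' j' := hM _ _ (by omega) (by omega)
        have e10 : pvMget M (i'+1) j' = pvD s1 s2 (i'+1) j' := hM _ _ (by omega) (by omega)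
        have e01 : pvMget M i' (j'+1) = pvD s1 s2 i' (j'+1) := hM _ _ (by omega) (by omega)
        simp only [pvLoop1, e11, e00, e10, e01]
        rw [pvPure_interior s1 s2 i' j']
        dsimp only
        rw [pvBest_eq s1 s2 i' j']
        by_cases hmatch : s1.getD i' "" = s2.getD j' ""
        · have hc : (if s1.getD i' "" = s2.getD j' "" then (0:Int) else 1) = 0 := if_pos hmatch
          simp only [hc, add_zero]
          by_cases hD : pvD s1 s2 (i'+1) (j'+1) = pvD s1 s2 i' j'
          · rw [if_pos ⟨hmatch, hD⟩, if_pos hD]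
            rw [ih i' j' (by omega) (by omega) (by omega)]
            simp
          · rw [if_neg (fun h => hD h.2), if_neg (fun h => h.1 hmatch), if_neg hD]
            by_cases hL : pvD s1 s2 (i'+1) (j'+1) = pvD s1 s2 (i'+1) j' + 1
            · rw [if_pos hL, if_pos hL]
              rw [ih (i'+1) j' (by omega) (by omega) (by omega)]
              simp
            · rw [if_neg hL, if_neg hL]
              have h4 : pvD s1 s2 (i'+1) (j'+1) = pvD s1 s2 i' (j'+1) + 1 := by
                have hv := pvD_interior s1 s2 i' j'
                rw [hc, add_zero] at hv
                rcases min_choice (pvD s1 s2 i' j')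
                    (min (pvD s1 s2 (i'+1) j' + 1) (pvD s1 s2 i' (j'+1) + 1)) with h | h
                · exact absurd (by omega) hD
                · rcases min_choice (pvD s1 s2 (i'+1) j' + 1) (pvD s1 s2 i' (j'+1) + 1) with h' | h'
                  · exact absurd (by omega) hL
                  · omega
              rw [if_pos h4]
              rw [ih i' (j'+1) (by omega) (by omega) (by omega)]
              simp
        · have hc : (if s1.getD i' "" = s2.getD j' "" then (0:Int) else 1) = 1 := if_neg hmatch
          simp only [hc]
          by_cases hD : pvD s1 s2 (i'+1) (j'+1) = pvD s1 s2 i' j' + 1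
          · rw [if_neg (fun h => hmatch h.1), if_pos ⟨hmatch, hD⟩, if_pos hD]
            rw [ih i' j' (by omega) (by omega) (by omega)]
            simp
          · rw [if_neg (fun h => hmatch h.1), if_neg (fun h => hD h.2), if_neg hD]
            by_cases hL : pvD s1 s2 (i'+1) (j'+1) = pvD s1 s2 (i'+1) j' + 1
            · rw [if_pos hL, if_pos hL]
              rw [ih (i'+1) j' (by omega) (by omega) (by omega)]
              simp
            · rw [if_neg hL, if_neg hL]
              have h4 : pvD s1 s2 (i'+1) (j'+1) = pvD s1 s2 i' (j'+1) + 1 := by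
                have hv := pvD_interior s1 s2 i' j'
                rw [hc] at hv
                rcases min_choice (pvD s1 s2 i' j' + 1)
                    (min (pvD s1 s2 (i'+1) j' + 1) (pvD s1 s2 i' (j'+1) + 1)) with h | h
                · exact absurd (by omega) hD
                · rcases min_choice (pvD s1 s2 (i'+1) j' + 1) (pvD s1 s2 i' (j'+1) + 1) with h' | h'
                  · exact absurd (by omega) hL
                  · omega
              rw [if_pos h4]
              rw [ih i' (j'+1) (by omega) (by omega) (by omega)]
              simp

theorem main_lists (s1 s2 : List String) :
    pvLoop1 s1 s2 (pvFillA s1 s2) s1.length s2.length [] [] =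
      ((pvPure s1 s2 s1.length s2.length).2.1.reverse,
       (pvPure s1 s2 s1.length s2.length).2.2.reverse) := by
  have h := trace_loop1 s1 s2 (pvFillA s1 s2)
    (fun i j hi hj => fillA_correct s1 s2 i j hi hj)
    (s1.length + s2.length) s1.length s2.length le_rfl le_rfl le_rfl [] []
  simpa using h

-- ===== VERDICT (by name: the statement is the Claim_ definition above) =====
theorem get_string_alignment_spec : Claim_equal_get_string_alignment := by
  unfold Claim_equal_get_string_alignment
  intro sent_1 sent_2 _
  unfold Spec_get_string_alignment get_string_alignment get_string_alignment_alt
  dsimp only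
  rw [pvRowsB_last, getD_map_range _ _ _ (by omega), pvUnwindB_eq, pvUnwindB_eq]
  simp only [List.nil_append]
  exact (main_lists _ _).symm ▸ main_lists _ _
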